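-- pv_equiv track=rewrite | github.com/nirmalpratheep/Alignment_and_Reasoning_RL | src/analysis_utils.py | analyze_format_failures
-- ===== SOURCE A (Python) =====
-- from typing import Dict, List, Tuple
--
-- def analyze_format_failures(
--     category_3: List[Dict],
--     max_examples: int = 10
-- ) -> Dict[str, int]:
--     """Analyze format failures in detail.
--
--     Args:
--         category_3: List of format failure results
--         max_examples: Maximum examples to analyze in detail
--
--     Returns:
--         Dictionary with format issue counts
--     """
--     format_issues = {
--         'missing_think_close': 0,
--         'missing_answer_open': 0,
--         'missing_answer_close': 0,
--         'wrong_order': 0,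
--         'incomplete_generation': 0
--     }
--
--     for result in category_3:
--         response = result.get('response', '')
--
--         has_think_close = "</think>" in response
--         has_answer_open = "<answer>" in response
--         has_answer_close = "</answer>" in response
--
--         if not has_think_close:
--             format_issues['missing_think_close'] += 1
--         if not has_answer_open:
--             format_issues['missing_answer_open'] += 1
--         if not has_answer_close:
--             format_issues['missing_answer_close'] += 1
--             format_issues['incomplete_generation'] += 1
--         if has_think_close and has_answer_open and "</think> <answer>" not in response:
--             format_issues['wrong_order'] += 1
--
--     return format_issues
-- ===== SOURCE B (Python) =====
-- def analyze_format_failures(category_3, max_examples=10):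
--     """Same counts, computed by independent passes instead of one fused loop."""
--     responses = [r.get('response', '') for r in category_3]
--     missing_think_close = sum(1 for s in responses if '</think>' not in s)
--     missing_answer_open = sum(1 for s in responses if '<answer>' not in s)
--     missing_answer_close = sum(1 for s in responses if '</answer>' not in s)
--     wrong_order = sum(1 for s in responses
--                       if '</think>' in s and '<answer>' in s
--                       and '</think> <answer>' not in s)
--     return {
--         'missing_think_close': missing_think_close,
--         'missing_answer_open': missing_answer_open,
--         'missing_answer_close': missing_answer_close,
--         'wrong_order': wrong_order,
--         'incomplete_generation': missing_answer_close,
--     }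
-- ===== Notes on version B (the rewrite author's own statement) =====
-- stated objective: simpler
-- what changed: Replaces the single fused loop mutating a counter dict with five independent per-key passes (comprehensions/countP) over the extracted response strings; incomplete_generation is computed once as the missing_answer_close count.
import Mathlib
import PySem

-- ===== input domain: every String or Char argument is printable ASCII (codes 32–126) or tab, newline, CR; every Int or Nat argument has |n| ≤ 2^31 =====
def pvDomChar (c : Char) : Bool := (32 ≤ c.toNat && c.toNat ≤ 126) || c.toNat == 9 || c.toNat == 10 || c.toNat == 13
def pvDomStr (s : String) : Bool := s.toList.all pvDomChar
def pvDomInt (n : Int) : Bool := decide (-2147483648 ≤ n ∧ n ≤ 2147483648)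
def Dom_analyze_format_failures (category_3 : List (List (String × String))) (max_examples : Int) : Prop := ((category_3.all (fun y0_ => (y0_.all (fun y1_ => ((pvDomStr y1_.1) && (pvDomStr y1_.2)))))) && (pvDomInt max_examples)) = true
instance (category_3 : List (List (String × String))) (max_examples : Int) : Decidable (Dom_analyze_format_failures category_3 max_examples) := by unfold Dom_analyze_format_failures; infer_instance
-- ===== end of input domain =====

-- B replaces A's single fused loop over a mutable counter dict by five independent
-- per-predicate passes over the extracted response strings (objective: simpler).

-- ===== PORT A =====
-- A's loop body: update the counter dict for one result (literal transcription).
def afStep (d : PySem.Dict String Int) (result : List (String × String)) : PySem.Dict String Int :=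
  let response := (PySem.Dict.mk result).getD "response" ""
  let has_think_close := PySem.Str.isIn "</think>" response
  let has_answer_open := PySem.Str.isIn "<answer>" response
  let has_answer_close := PySem.Str.isIn "</answer>" response
  let d := if !has_think_close then d.modify "missing_think_close" 0 (· + 1) else d
  let d := if !has_answer_open then d.modify "missing_answer_open" 0 (· + 1) else d
  let d := if !has_answer_close then
      (d.modify "missing_answer_close" 0 (· + 1)).modify "incomplete_generation" 0 (· + 1)
    else d
  if has_think_close && has_answer_open && !PySem.Str.isIn "</think> <answer>" response then
    d.modify "wrong_order" 0 (· + 1)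
  else d

def analyze_format_failures (category_3 : List (List (String × String))) (_max_examples : Int) : List (String × Int) :=
  let format_issues : PySem.Dict String Int := PySem.Dict.mk
    [("missing_think_close", 0), ("missing_answer_open", 0), ("missing_answer_close", 0),
     ("wrong_order", 0), ("incomplete_generation", 0)]
  (category_3.foldl afStep format_issues).items

-- ===== PORT B =====
def bResp (r : List (String × String)) : String := (PySem.Dict.mk r).getD "response" ""

def analyze_format_failures_alt (category_3 : List (List (String × String))) (_max_examples : Int) : List (String × Int) :=
  let responses := category_3.map bResp
  let missing_think_close : Int := responses.countP (fun s => !PySem.Str.isIn "</think>" s)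
  let missing_answer_open : Int := responses.countP (fun s => !PySem.Str.isIn "<answer>" s)
  let missing_answer_close : Int := responses.countP (fun s => !PySem.Str.isIn "</answer>" s)
  let wrong_order : Int := responses.countP (fun s =>
    PySem.Str.isIn "</think>" s && PySem.Str.isIn "<answer>" s && !PySem.Str.isIn "</think> <answer>" s)
  [("missing_think_close", missing_think_close), ("missing_answer_open", missing_answer_open),
   ("missing_answer_close", missing_answer_close), ("wrong_order", wrong_order),
   ("incomplete_generation", missing_answer_close)]

-- ===== PRECONDITION & SPEC =====
def Spec_analyze_format_failures (category_3 : List (List (String × String))) (max_examples : Int) (out : List (String × Int)) : Prop := out = analyze_format_failures_alt category_3 max_examples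
instance (category_3 : List (List (String × String))) (max_examples : Int) (out : List (String × Int)) : Decidable (Spec_analyze_format_failures category_3 max_examples out) := by unfold Spec_analyze_format_failures; infer_instance

-- ===== CLAIM (what is proved, stated in full; the proofs are below) =====
def Claim_equal_analyze_format_failures : Prop := ∀ (category_3 : List (List (String × String))) (max_examples : Int), Dom_analyze_format_failures category_3 max_examples → Spec_analyze_format_failures category_3 max_examples (analyze_format_failures category_3 max_examples)

-- ===== LEMMAS AND PROOFS =====

-- The counter dict in its invariant shape (five fixed keys, in insertion order).
def dict5 (a b c d e : Int) : PySem.Dict String Int := PySem.Dict.mk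
  [("missing_think_close", a), ("missing_answer_open", b), ("missing_answer_close", c),
   ("wrong_order", d), ("incomplete_generation", e)]

lemma afStep_dict5 (a b c d e : Int) (r : List (String × String)) :
    afStep (dict5 a b c d e) r =
      dict5 (a + (if !PySem.Str.isIn "</think>" (bResp r) then 1 else 0))
            (b + (if !PySem.Str.isIn "<answer>" (bResp r) then 1 else 0))
            (c + (if !PySem.Str.isIn "</answer>" (bResp r) then 1 else 0))
            (d + (if PySem.Str.isIn "</think>" (bResp r) && PySem.Str.isIn "<answer>" (bResp r)
                     && !PySem.Str.isIn "</think> <answer>" (bResp r) then 1 else 0))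
            (e + (if !PySem.Str.isIn "</answer>" (bResp r) then 1 else 0)) := by
  simp only [afStep, dict5, bResp]
  split_ifs <;> simp_all [PySem.Dict.modify, PySem.Dict.get?, PySem.Dict.insert, PySem.Dict.getD]

lemma foldl_afStep (l : List (List (String × String))) (a b c d e : Int) :
    l.foldl afStep (dict5 a b c d e) =
      dict5 (a + ((l.map bResp).countP (fun s => !PySem.Str.isIn "</think>" s) : Int))
            (b + ((l.map bResp).countP (fun s => !PySem.Str.isIn "<answer>" s) : Int))
            (c + ((l.map bResp).countP (fun s => !PySem.Str.isIn "</answer>" s) : Int))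
            (d + ((l.map bResp).countP (fun s =>
                PySem.Str.isIn "</think>" s && PySem.Str.isIn "<answer>" s
                && !PySem.Str.isIn "</think> <answer>" s) : Int))
            (e + ((l.map bResp).countP (fun s => !PySem.Str.isIn "</answer>" s) : Int)) := by
  induction l generalizing a b c d e with
  | nil => simp
  | cons x t ih =>
    rw [List.foldl_cons, afStep_dict5, ih]
    simp only [List.map_cons, List.countP_cons, dict5, PySem.Dict.mk.injEq, List.cons.injEq,
      Prod.mk.injEq, and_true, true_and]
    refine ⟨?_, ?_, ?_, ?_, ?_⟩ <;> split_ifs <;> simp <;> omega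

-- ===== VERDICT (by name: the statement is the Claim_ definition above) =====
theorem analyze_format_failures_spec : Claim_equal_analyze_format_failures := by
  intro category_3 max_examples _
  show _ = _
  simp only [analyze_format_failures, analyze_format_failures_alt]
  have h := foldl_afStep category_3 0 0 0 0 0
  simp only [dict5] at h
  rw [h]
  simp
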